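-- pv_equiv track=rewrite | github.com/BrantVanderveen/centiment | main.py | filter_for_stocks
-- ===== SOURCE A (Python) =====
-- def filter_for_stocks(c):
--     i = 0
--     stocks = []
--     while i < len(c):
--         if c[i].islower() and not c[i] == '.':
--             i = i + 1
--         else:
--             stock = ''
--             valid = True
--             for j in range(i, min(i+5, len(c))):
--                 if c[j].islower() or not c[j].isalpha():
--                     i = j + 1
--                     valid = False
--                     break
--                 else:
--                     stock = stock + c[j]
--             if len(stock) >= 3 and not blacklisted_stocks(stock):
--                 stocks.append(stock)
--             if valid:
--                 i = i + len(stock)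
--     return stocks
--
-- def blacklisted_stocks(stock):
--     blacklist = ['ETF', 'IPO', 'YOLO', 'THE', 'EDIT',
--                  'EOW', 'WSB', 'STEM', 'CERB', 'CRA',
--                  'TFSA', 'TSX', 'IRA', 'IRS',
--                  'HOA', 'CCP', 'FUCK', 'BUY',
--                  'HOLD', 'CEO', 'FUCKI', 'HHHHH',
--                  'LETS', 'GANG']
--     if blacklist.count(stock):
--         return True
--     return False
-- ===== SOURCE B (Python) =====
-- BLACKLIST = {'ETF', 'IPO', 'YOLO', 'THE', 'EDIT',
--              'EOW', 'WSB', 'STEM', 'CERB', 'CRA',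
--              'TFSA', 'TSX', 'IRA', 'IRS',
--              'HOA', 'CCP', 'FUCK', 'BUY',
--              'HOLD', 'CEO', 'FUCKI', 'HHHHH',
--              'LETS', 'GANG'}
--
--
-- def filter_for_stocks(c):
--     # Pass 1: split c into maximal runs of non-lowercase alphabetic characters.
--     runs = []
--     cur = ''
--     for ch in c:
--         if ch.isalpha() and not ch.islower():
--             cur += ch
--         else:
--             if cur:
--                 runs.append(cur)
--             cur = ''
--     if cur:
--         runs.append(cur)
--     # Pass 2: chop each run into consecutive pieces of length 5; keep pieces
--     # of length >= 3 that are not blacklisted.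
--     stocks = []
--     for run in runs:
--         for k in range(0, len(run), 5):
--             piece = run[k:k + 5]
--             if len(piece) >= 3 and piece not in BLACKLIST:
--                 stocks.append(piece)
--     return stocks
-- ===== Notes on version B (the rewrite author's own statement) =====
-- stated objective: simpler
-- what changed: Replaced A's single index-juggling while-loop (inner 5-char scan with a break/valid flag and manual index arithmetic) by two clean passes: tokenize the string into maximal runs of non-lowercase letters, then slice each run into consecutive pieces of 5 and keep the pieces of length >= 3 that are not blacklisted.
import Mathlib
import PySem

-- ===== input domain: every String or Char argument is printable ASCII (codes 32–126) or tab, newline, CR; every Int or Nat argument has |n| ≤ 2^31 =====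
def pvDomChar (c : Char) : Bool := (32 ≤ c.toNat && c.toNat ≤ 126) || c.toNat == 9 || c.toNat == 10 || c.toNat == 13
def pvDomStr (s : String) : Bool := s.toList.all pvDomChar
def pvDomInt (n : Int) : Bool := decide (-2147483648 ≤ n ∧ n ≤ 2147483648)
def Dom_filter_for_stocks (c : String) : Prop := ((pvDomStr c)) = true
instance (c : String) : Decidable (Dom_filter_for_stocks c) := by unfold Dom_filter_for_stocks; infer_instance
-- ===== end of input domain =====

-- B replaces A's single index-juggling while-loop by two passes: tokenize into maximal
-- runs of non-lowercase letters, then chunk each run into pieces of 5 (objective: simpler; a timing run also measured B faster).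

-- ===== PORT A =====
def pvBlacklistA : List String :=
  ["ETF", "IPO", "YOLO", "THE", "EDIT",
   "EOW", "WSB", "STEM", "CERB", "CRA",
   "TFSA", "TSX", "IRA", "IRS",
   "HOA", "CCP", "FUCK", "BUY",
   "HOLD", "CEO", "FUCKI", "HHHHH",
   "LETS", "GANG"]

def blacklisted_stocks (stock : String) : Bool :=
  if PySem.List.count pvBlacklistA stock ≠ 0 then true else false

-- the inner 'for j in range(i, min(i+5, len(c)))' loop: returns (stock, valid, consumed)
def pvInnerA : List Char → Nat → (List Char × Bool × Nat)
  | _, 0 => ([], true, 0)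
  | [], _ + 1 => ([], true, 0)
  | ch :: rest, k + 1 =>
    if PySem.Chars.islower ch || !PySem.Chars.isalpha ch then ([], false, 1)
    else
      let r := pvInnerA rest k
      (ch :: r.1, r.2.1, r.2.2 + 1)

theorem pvInnerA_drop_pos (ch : Char) (rest : List Char) (n : Nat) (hn : 1 ≤ n) :
    1 ≤ (pvInnerA (ch :: rest) n).2.2 := by
  match n with
  | k + 1 =>
    simp only [pvInnerA]
    split <;> simp

def pvGoA : List Char → List String
  | [] => []
  | ch :: rest =>
    if PySem.Chars.islower ch && !(ch == '.') then pvGoA rest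
    else
      let r := pvInnerA (ch :: rest) 5
      (if 3 ≤ r.1.length ∧ !blacklisted_stocks (String.ofList r.1) then [String.ofList r.1] else []) ++
        pvGoA ((ch :: rest).drop r.2.2)
  termination_by l => l.length
  decreasing_by
  · simp
  · have h := pvInnerA_drop_pos ch rest 5 (by norm_num)
    simp only [List.length_drop, List.length_cons]
    omega

def filter_for_stocks (c : String) : List String := pvGoA c.toList

-- ===== PORT B =====
def pvBlacklistB : List String :=
  ["ETF", "IPO", "YOLO", "THE", "EDIT",
   "EOW", "WSB", "STEM", "CERB", "CRA",
   "TFSA", "TSX", "IRA", "IRS",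
   "HOA", "CCP", "FUCK", "BUY",
   "HOLD", "CEO", "FUCKI", "HHHHH",
   "LETS", "GANG"]

def pvP (ch : Char) : Bool := PySem.Chars.isalpha ch && !PySem.Chars.islower ch

-- pass 1: the tokenizing for-loop with its 'cur'/'runs' accumulators
def pvRunsB : List Char → List Char → List (List Char) → List (List Char)
  | [], cur, runs => if cur ≠ [] then runs ++ [cur] else runs
  | ch :: rest, cur, runs =>
    if pvP ch then pvRunsB rest (cur ++ [ch]) runs
    else pvRunsB rest [] (if cur ≠ [] then runs ++ [cur] else runs)

-- pass 2's inner 'for k in range(0, len(run), 5)': successive slices run[k:k+5]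
def pvChunksB : List Char → List (List Char)
  | [] => []
  | ch :: rest => ((ch :: rest).take 5) :: pvChunksB ((ch :: rest).drop 5)
  termination_by l => l.length
  decreasing_by simp

def pvKeepB (p : List Char) : Bool :=
  3 ≤ p.length && !(pvBlacklistB.contains (String.ofList p))

def filter_for_stocks_alt (c : String) : List String :=
  (pvRunsB c.toList [] []).foldl
    (fun acc run =>
      (pvChunksB run).foldl
        (fun acc2 p => if pvKeepB p then acc2 ++ [String.ofList p] else acc2) acc)
    []

-- ===== PRECONDITION & SPEC =====
def Spec_filter_for_stocks (c : String) (out : List String) : Prop := out = filter_for_stocks_alt c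
instance (c : String) (out : List String) : Decidable (Spec_filter_for_stocks c out) := by unfold Spec_filter_for_stocks; infer_instance

-- ===== CLAIM (what is proved, stated in full; the proofs are below) =====
def Claim_equal_filter_for_stocks : Prop := ∀ (c : String), Dom_filter_for_stocks c → Spec_filter_for_stocks c (filter_for_stocks c)

-- ===== LEMMAS AND PROOFS =====

-- abbreviations for the B side used only in proofs
def pvEmit (r : List Char) : List String :=
  ((pvChunksB r).filter pvKeepB).map String.ofList

def pvFE (l : List Char) : List String := (pvRunsB l [] []).flatMap pvEmit

theorem pvFoldChunks (cs : List (List Char)) (acc : List String) :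
    cs.foldl (fun a p => if pvKeepB p then a ++ [String.ofList p] else a) acc
      = acc ++ (cs.filter pvKeepB).map String.ofList := by
  induction cs generalizing acc with
  | nil => simp
  | cons c cs ih =>
    by_cases h : pvKeepB c = true <;> simp [List.foldl_cons, h, ih]

theorem pvFoldRuns (runs : List (List Char)) (acc : List String) :
    runs.foldl
      (fun acc run =>
        (pvChunksB run).foldl
          (fun acc2 p => if pvKeepB p then acc2 ++ [String.ofList p] else acc2) acc)
      acc = acc ++ runs.flatMap pvEmit := by
  induction runs generalizing acc with
  | nil => simp
  | cons r rs ih =>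
    rw [List.foldl_cons, pvFoldChunks, ih]
    simp [pvEmit, List.flatMap_cons, List.append_assoc]

-- pvRunsB accumulator lemmas
theorem pvRunsB_acc (l : List Char) : ∀ (cur : List Char) (runs : List (List Char)),
    pvRunsB l cur runs = runs ++ pvRunsB l cur [] := by
  induction l with
  | nil =>
    intro cur runs
    simp only [pvRunsB]
    split <;> simp
  | cons ch rest ih =>
    intro cur runs
    by_cases hP : pvP ch = true
    · simp only [pvRunsB, if_pos hP]
      exact ih (cur ++ [ch]) runs
    · simp only [pvRunsB, if_neg hP]
      by_cases h : cur = []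
      · simp only [h, ne_eq, not_true_eq_false, reduceIte]
        exact ih [] runs
      · simp only [ne_eq, h, not_false_eq_true, if_pos]
        rw [ih [] (runs ++ [cur]), ih [] ([] ++ [cur])]
        simp

theorem pvRunsB_notP (ch : Char) (rest : List Char) (runs : List (List Char))
    (hP : pvP ch = false) : pvRunsB (ch :: rest) [] runs = pvRunsB rest [] runs := by
  simp [pvRunsB, hP]

theorem pvRunsB_run (r : List Char) (hr : ∀ x ∈ r, pvP x = true) :
    ∀ (suffix cur : List Char), pvRunsB (r ++ suffix) cur [] = pvRunsB suffix (cur ++ r) [] := by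
  induction r with
  | nil => simp
  | cons ch r ih =>
    intro suffix cur
    have h := hr ch (by simp)
    simp only [List.cons_append, pvRunsB, h, if_pos]
    rw [ih (fun x hx => hr x (by simp [hx])) suffix (cur ++ [ch])]
    simp

theorem pvRunsB_flush_nil (cur : List Char) (h : cur ≠ []) :
    pvRunsB [] cur [] = [cur] := by simp [pvRunsB, h]

theorem pvRunsB_flush_cons (ch : Char) (rest cur : List Char) (hP : pvP ch = false)
    (h : cur ≠ []) : pvRunsB (ch :: rest) cur [] = cur :: pvRunsB rest [] [] := by
  have e : ¬ pvP ch = true := by simp [hP]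
  simp only [pvRunsB, if_neg e, ne_eq, h, not_false_eq_true, if_pos]
  rw [List.nil_append, pvRunsB_acc rest [] [cur]]
  simp

-- pvFE decomposition at a maximal run boundary
theorem pvFE_nil : pvFE [] = [] := by simp [pvFE, pvRunsB]

theorem pvFE_notP (ch : Char) (rest : List Char) (hP : pvP ch = false) :
    pvFE (ch :: rest) = pvFE rest := by
  simp [pvFE, pvRunsB_notP _ _ _ hP]

theorem pvFE_run (r suffix : List Char) (hr : ∀ x ∈ r, pvP x = true)
    (hs : suffix = [] ∨ ∃ h t, suffix = h :: t ∧ pvP h = false) :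
    pvFE (r ++ suffix) = pvEmit r ++ pvFE suffix := by
  by_cases hrn : r = []
  · subst hrn; simp [pvEmit, pvChunksB]
  · unfold pvFE
    rw [pvRunsB_run r hr suffix []]
    simp only [List.nil_append]
    rcases hs with hs | ⟨h, t, hs, hPh⟩
    · subst hs
      rw [pvRunsB_flush_nil r hrn]
      simp [pvRunsB]
    · subst hs
      rw [pvRunsB_flush_cons h t r hPh hrn]
      simp [pvRunsB_notP _ _ _ hPh]

theorem pvEmit_cons (r : List Char) (hrn : r ≠ []) :
    pvEmit r = (if pvKeepB (r.take 5) then [String.ofList (r.take 5)] else []) ++ pvEmit (r.drop 5) := by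
  match r, hrn with
  | ch :: rest, _ =>
    unfold pvEmit
    simp only [pvChunksB, List.filter_cons]
    split <;> simp

-- the two blacklist tests agree
theorem pvBlacklist_eq (s : String) :
    blacklisted_stocks s = pvBlacklistB.contains s := by
  unfold blacklisted_stocks
  rw [PySem.List.count_eq]
  have hBB : pvBlacklistB = pvBlacklistA := rfl
  rw [hBB]
  by_cases h : s ∈ pvBlacklistA
  · have hc : List.count s pvBlacklistA ≠ 0 := by
      have := List.count_pos_iff.mpr h
      omega
    simp [hc, h]
  · simp [List.count_eq_zero.mpr h, h]

-- A's append condition equals B's keep-test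
theorem pvCond_eq (p : List Char) :
    (if 3 ≤ p.length ∧ !blacklisted_stocks (String.ofList p) then [String.ofList p] else [])
      = (if pvKeepB p then [String.ofList p] else []) := by
  unfold pvKeepB
  rw [pvBlacklist_eq]
  by_cases h1 : 3 ≤ p.length <;> by_cases h2 : pvBlacklistB.contains (String.ofList p) = true <;>
    simp [h1, h2]

-- A's inner loop characterised by the maximal non-lowercase-letter prefix
theorem pvInnerA_spec : ∀ (l : List Char) (k : Nat),
    pvInnerA l k = ((l.takeWhile pvP).take k,
      decide (k ≤ (l.takeWhile pvP).length ∨ l.length ≤ (l.takeWhile pvP).length),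
      if k ≤ (l.takeWhile pvP).length then k
      else if l.length ≤ (l.takeWhile pvP).length then (l.takeWhile pvP).length
      else (l.takeWhile pvP).length + 1)
  | l, 0 => by simp [pvInnerA]
  | [], k + 1 => by simp [pvInnerA]
  | ch :: rest, k + 1 => by
    have key : (PySem.Chars.islower ch || !PySem.Chars.isalpha ch) = !pvP ch := by
      unfold pvP
      cases PySem.Chars.islower ch <;> cases PySem.Chars.isalpha ch <;> rfl
    by_cases hP : pvP ch = true
    · rw [pvInnerA, key, hP]
      simp only [Bool.not_true, Bool.false_eq_true, reduceIte]
      rw [pvInnerA_spec rest k]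
      rw [List.takeWhile_cons_of_pos hP]
      simp only [List.take_succ_cons, List.length_cons]
      simp only [Prod.mk.injEq, true_and]
      refine ⟨?_, ?_⟩
      · rw [decide_eq_decide]; omega
      · split_ifs <;> omega
    · rw [pvInnerA, key]
      simp only [Bool.not_eq_true] at hP
      rw [hP]
      rw [List.takeWhile_cons_of_neg (by simp [hP])]
      simp only [List.length_nil, List.take_nil, List.length_cons, Bool.not_false, if_pos]
      have h1 : ¬ (k + 1 ≤ 0) := by omega
      have h2 : ¬ (rest.length + 1 ≤ 0) := by omega
      simp [h1, h2]

-- elements dropped from an all-P list remain all-P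
theorem pvAllP_drop (r : List Char) (hr : ∀ x ∈ r, pvP x = true) (n : Nat) :
    ∀ x ∈ r.drop n, pvP x = true := fun x hx => hr x (List.mem_of_mem_drop hx)

theorem pvDropWhile_shape (l : List Char) :
    l.dropWhile pvP = [] ∨ ∃ h t, l.dropWhile pvP = h :: t ∧ pvP h = false := by
  induction l with
  | nil => left; rfl
  | cons ch rest ih =>
    by_cases hP : pvP ch = true
    · rw [List.dropWhile_cons_of_pos hP]; exact ih
    · right
      refine ⟨ch, rest, List.dropWhile_cons_of_neg (by simpa using hP), by simpa using hP⟩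

-- main equivalence, by strong induction on the length
theorem pvCore : ∀ (n : Nat) (l : List Char), l.length ≤ n → pvGoA l = pvFE l := by
  intro n
  induction n with
  | zero =>
    intro l hl
    have : l = [] := List.eq_nil_of_length_eq_zero (by omega)
    subst this
    simp [pvGoA, pvFE_nil]
  | succ n ih =>
    intro l hl
    match l with
    | [] => simp [pvGoA, pvFE_nil]
    | ch :: rest =>
      by_cases hlow : (PySem.Chars.islower ch && !(ch == '.')) = true
      · -- lowercase: skip one char on both sides
        have hP : pvP ch = false := by
          unfold pvP
          rcases Bool.and_eq_true .. |>.mp hlow with ⟨h1, _⟩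
          simp [h1]
        rw [pvGoA, if_pos hlow, pvFE_notP ch rest hP]
        exact ih rest (by simp at hl; omega)
      · rw [pvGoA, if_neg hlow]
        by_cases hP : pvP ch = true
        · -- an uppercase-letter run starts here
          set r := (ch :: rest).takeWhile pvP with hr
          set suffix := (ch :: rest).dropWhile pvP with hsfx
          have hsplit : r ++ suffix = ch :: rest := List.takeWhile_append_dropWhile
          have hallP : ∀ x ∈ r, pvP x = true := fun x hx => List.mem_takeWhile_imp hx
          have hshape := pvDropWhile_shape (ch :: rest)
          have hm1 : 1 ≤ r.length := by
            rw [hr, List.takeWhile_cons_of_pos hP]; simp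
          have hlen : r.length + suffix.length = rest.length + 1 := by
            have := congrArg List.length hsplit
            simp at this; omega
          rw [pvInnerA_spec (ch :: rest) 5]
          simp only []
          rw [pvCond_eq]
          -- rewrite the RHS
          conv_rhs => rw [← hsplit]
          rw [pvFE_run r suffix hallP (by rw [hsfx]; exact hshape)]
          rw [pvEmit_cons r (by intro h; rw [h] at hm1; simp at hm1)]
          rw [List.append_assoc]
          have hfe2 : pvEmit (r.drop 5) ++ pvFE suffix = pvFE (r.drop 5 ++ suffix) := by
            rw [pvFE_run (r.drop 5) suffix (pvAllP_drop r hallP 5) (by rw [hsfx]; exact hshape)]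
          rw [hfe2]
          -- match the stock and the continuation
          congr 1
          by_cases h5 : 5 ≤ r.length
          · rw [if_pos h5]
            have hdrop : (ch :: rest).drop 5 = r.drop 5 ++ suffix := by
              conv_lhs => rw [← hsplit]
              rw [List.drop_append_of_le_length h5]
            rw [hdrop]
            exact ih _ (by
              have h1 : (List.drop 5 r ++ suffix).length = r.length - 5 + suffix.length := by
                rw [List.length_append, List.length_drop]
              have h2 : (ch :: rest).length = rest.length + 1 := by simp
              omega)
          · rw [if_neg h5]
            have hrd : r.drop 5 = [] := List.drop_eq_nil_of_le (by omega)
            rw [hrd, List.nil_append]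
            by_cases hend : (ch :: rest).length ≤ r.length
            · -- the run reaches the end of the string
              have hs0 : suffix = [] := by
                have hlc : (ch :: rest).length = rest.length + 1 := by simp
                have : suffix.length = 0 := by omega
                exact List.eq_nil_of_length_eq_zero this
              rw [if_pos hend, hs0]
              have : (ch :: rest).drop r.length = [] := by
                apply List.drop_eq_nil_of_le
                simpa using hend
              rw [this]
              simp [pvGoA, pvFE_nil]
            · -- a non-matching char within the first five positions
              rw [if_neg hend]
              rcases hshape with hs0 | ⟨h, t, hst, hPh⟩
              · exfalso
                rw [← hsfx] at hs0
                rw [hs0] at hlen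
                simp at hend hlen
                omega
              rw [← hsfx] at hst
              have hdrop : (ch :: rest).drop (r.length + 1) = t := by
                conv_lhs => rw [← hsplit, hst]
                rw [List.drop_append]
                rw [List.drop_eq_nil_of_le (by omega), List.nil_append]
                have : r.length + 1 - r.length = 1 := by omega
                rw [this]
                rfl
              rw [hdrop, hst, pvFE_notP h t hPh]
              exact ih t (by
                have h2 : suffix.length = t.length + 1 := by rw [hst]; simp
                have h3 : (ch :: rest).length = rest.length + 1 := by simp
                omega)
        · -- a non-letter separator: one step on both sides
          rw [pvInnerA_spec (ch :: rest) 5]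
          have htw : (ch :: rest).takeWhile pvP = [] := List.takeWhile_cons_of_neg (by simpa using hP)
          rw [htw]
          simp only [List.take_nil, List.length_nil]
          have h1 : ¬ (5 ≤ 0) := by omega
          have h2 : ¬ ((ch :: rest).length ≤ 0) := by rw [List.length_cons]; omega
          rw [if_neg h1, if_neg h2]
          have : ¬ (3 ≤ (0:Nat)) := by omega
          rw [if_neg (by simp [this])]
          simp only [List.nil_append, List.drop_succ_cons, List.drop_zero]
          rw [pvFE_notP ch rest (by simpa using hP)]
          exact ih rest (by simp at hl; omega)

theorem filter_for_stocks_core (l : List Char) :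
    pvGoA l = (pvRunsB l [] []).foldl
      (fun acc run =>
        (pvChunksB run).foldl
          (fun acc2 p => if pvKeepB p then acc2 ++ [String.ofList p] else acc2) acc)
      [] := by
  rw [pvFoldRuns, List.nil_append]
  exact pvCore l.length l (le_refl _)

-- ===== VERDICT (by name: the statement is the Claim_ definition above) =====
theorem filter_for_stocks_spec : Claim_equal_filter_for_stocks := by
  intro c _
  unfold Spec_filter_for_stocks filter_for_stocks filter_for_stocks_alt
  exact filter_for_stocks_core c.toList
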